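-- pv_equiv track=rewrite | github.com/pypi-data/pypi-mirror-234 | packages/crypto-screening/crypto-screening-8.12.1.tar.gz/crypto-screening-8.12.1/crypto_screening/utils/process.py | find_string_value
-- ===== SOURCE A (Python) =====
-- from typing import Iterable, List, Set, Optional, Dict
--
-- def find_string_value(value: str, values: Iterable[str]) -> str:
--     """
--     Finds the exchange in the exchanges.
--
--     :param value: The name of the exchange.
--     :param values: The exchanges to search in.
--
--     :return: The valid exchange name.
--     """
--
--     if value in values:
--         return value
--     # end if
--
--     if value.lower() in values:
--         return value.lower()
--     # end if
--
--     if value.upper() in values: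
--         return value.upper()
--     # end if
--
--     for valid in values:
--         if value.lower() == valid.lower():
--             return valid
--         # end if
--     # end for
--
--     return value
-- ===== SOURCE B (Python) =====
-- # Single pass over values with flags instead of A's three membership scans plus a final loop.
-- # Equivalence is about list/re-iterable containers (A consumes a one-shot iterator multiple times).
-- def find_string_value(value: str, values) -> str:
--     lo = value.lower()
--     up = value.upper()
--     found_exact = found_lower = found_upper = False
--     first_ci = None
--     for e in values:
--         if e == value:
--             found_exact = True
--         if e == lo:
--             found_lower = True
--         if e == up:
--             found_upper = True
--         if first_ci is None and e.lower() == lo: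
--             first_ci = e
--     if found_exact:
--         return value
--     if found_lower:
--         return lo
--     if found_upper:
--         return up
--     if first_ci is not None:
--         return first_ci
--     return value
-- ===== Notes on version B (the rewrite author's own statement) =====
-- stated objective: faster
-- what changed: Replaces A's three separate membership scans plus a final case-insensitive loop with one single pass that maintains found_exact/found_lower/found_upper flags and the first case-insensitive match.
import Mathlib
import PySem

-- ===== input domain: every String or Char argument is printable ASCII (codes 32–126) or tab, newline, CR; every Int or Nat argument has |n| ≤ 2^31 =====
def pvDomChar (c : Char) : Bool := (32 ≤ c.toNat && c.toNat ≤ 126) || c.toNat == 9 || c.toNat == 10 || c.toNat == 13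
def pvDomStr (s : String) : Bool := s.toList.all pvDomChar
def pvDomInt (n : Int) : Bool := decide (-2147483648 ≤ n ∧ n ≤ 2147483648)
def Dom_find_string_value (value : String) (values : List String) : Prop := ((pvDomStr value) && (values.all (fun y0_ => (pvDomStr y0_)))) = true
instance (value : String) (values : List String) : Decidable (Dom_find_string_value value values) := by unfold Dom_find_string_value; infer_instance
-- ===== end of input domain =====

-- B replaces A's three membership scans + final loop with one pass keeping flags; equivalence is about the return value on lists.

-- ===== PORT A =====
-- A's final 'for valid in values' loop: first element with value.lower() == valid.lower(), else value
def fsvLoopA (value : String) : List String → String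
  | [] => value
  | v :: rest =>
    if PySem.Str.lower value == PySem.Str.lower v then v else fsvLoopA value rest

def find_string_value (value : String) (values : List String) : String :=
  if values.contains value then value
  else if values.contains (PySem.Str.lower value) then PySem.Str.lower value
  else if values.contains (PySem.Str.upper value) then PySem.Str.upper value
  else fsvLoopA value values

-- ===== PORT B =====
def find_string_value_alt (value : String) (values : List String) : String :=
  let lo := PySem.Str.lower value
  let up := PySem.Str.upper value
  let s := values.foldl
    (fun (st : Bool × Bool × Bool × Option String) e =>
      ( st.1 || e == value,
        st.2.1 || e == lo,
        st.2.2.1 || e == up,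
        match st.2.2.2 with
        | some v => some v
        | none => if PySem.Str.lower e == lo then some e else none))
    (false, false, false, none)
  if s.1 then value
  else if s.2.1 then lo
  else if s.2.2.1 then up
  else
    match s.2.2.2 with
    | some v => v
    | none => value

-- ===== PRECONDITION & SPEC =====
def Spec_find_string_value (value : String) (values : List String) (out : String) : Prop := out = find_string_value_alt value values
instance (value : String) (values : List String) (out : String) : Decidable (Spec_find_string_value value values out) := by unfold Spec_find_string_value; infer_instance

-- ===== CLAIM (what is proved, stated in full; the proofs are below) =====
def Claim_equal_find_string_value : Prop := ∀ (value : String) (values : List String), Dom_find_string_value value values → Spec_find_string_value value values (find_string_value value values)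

-- ===== LEMMAS AND PROOFS =====

theorem fsv_scan_spec (value lo up : String) (l : List String)
    (st : Bool × Bool × Bool × Option String) :
    l.foldl
      (fun (st : Bool × Bool × Bool × Option String) e =>
        ( st.1 || e == value,
          st.2.1 || e == lo,
          st.2.2.1 || e == up,
          match st.2.2.2 with
          | some v => some v
          | none => if PySem.Str.lower e == lo then some e else none))
      st
    = ( st.1 || l.contains value,
        st.2.1 || l.contains lo,
        st.2.2.1 || l.contains up,
        match st.2.2.2 with
        | some v => some v
        | none => l.find? (fun e => PySem.Str.lower e == lo) ) := by
  induction l generalizing st with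
  | nil => obtain ⟨a, b, c, o⟩ := st; cases o <;> simp
  | cons x xs ih =>
    simp only [List.foldl_cons, ih, List.contains_cons, List.find?_cons]
    obtain ⟨a, b, c, o⟩ := st
    simp only
    refine Prod.ext ?_ (Prod.ext ?_ (Prod.ext ?_ ?_)) <;> simp only
    · rw [Bool.or_assoc]; congr 1; rw [Bool.or_comm, Bool.beq_comm]; rw [Bool.or_comm]
    · rw [Bool.or_assoc]; congr 1; rw [Bool.or_comm, Bool.beq_comm]; rw [Bool.or_comm]
    · rw [Bool.or_assoc]; congr 1; rw [Bool.or_comm, Bool.beq_comm]; rw [Bool.or_comm]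
    · cases o with
      | some v => rfl
      | none =>
        by_cases h : PySem.Str.lower x == lo
        · simp [h]
        · simp [h]

theorem fsvLoopA_eq_find? (value : String) (l : List String) :
    fsvLoopA value l
      = (l.find? (fun e => PySem.Str.lower e == PySem.Str.lower value)).getD value := by
  induction l with
  | nil => rfl
  | cons x xs ih =>
    simp only [fsvLoopA, List.find?_cons]
    by_cases h : PySem.Str.lower value = PySem.Str.lower x
    · simp [h]
    · have h' : (PySem.Str.lower x == PySem.Str.lower value) = false := by
        simp; exact fun hx => h hx.symm
      simp [h, h', ih]

-- ===== VERDICT (by name: the statement is the Claim_ definition above) =====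
theorem find_string_value_spec : Claim_equal_find_string_value := by
  intro value values _
  unfold Spec_find_string_value find_string_value find_string_value_alt
  dsimp only
  rw [fsv_scan_spec, fsvLoopA_eq_find?]
  simp only [Bool.false_or]
  split_ifs <;> try rfl
  cases values.find? (fun e => PySem.Str.lower e == PySem.Str.lower value) <;> rfl
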